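-- pv_equiv track=rewrite | github.com/ReinVelt/www.velt.org | projects/CyberQuest/scripts/audit_hotspots.py | is_nav_hotspot
-- ===== SOURCE A (Python) =====
-- def is_nav_hotspot(hotspot):
--     """Check if this is a navigation/back/exit hotspot."""
--     hid = (hotspot.get('id') or '').lower()
--     hname = (hotspot.get('name') or '').lower()
--     nav_keywords = ['back', 'exit', 'leave', 'drive', 'return', 'go_to', 'goto',
--                     'navigate', 'door', 'path', 'road', 'arrow', 'map']
--     for kw in nav_keywords:
--         if kw in hid or kw in hname:
--             return True
--     return False
-- ===== SOURCE B (Python) =====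
-- NAV_BY_FIRST = {
--     'b': ['back'], 'e': ['exit'], 'l': ['leave'], 'd': ['drive', 'door'],
--     'r': ['return', 'road'], 'g': ['go_to', 'goto'], 'n': ['navigate'],
--     'p': ['path'], 'a': ['arrow'], 'm': ['map'],
-- }
--
--
-- def _has_nav(text):
--     """One left-to-right scan: at each position, only the keywords starting
--     with that character (looked up in NAV_BY_FIRST) are tried."""
--     s = text.lower()
--     for i, ch in enumerate(s):
--         for kw in NAV_BY_FIRST.get(ch, []):
--             if s.startswith(kw, i):
--                 return True
--     return False
--
--
-- def is_nav_hotspot(hotspot):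
--     """Check if this is a navigation/back/exit hotspot."""
--     return _has_nav(hotspot.get('id') or '') or _has_nav(hotspot.get('name') or '')
-- ===== Notes on version B (the rewrite author's own statement) =====
-- stated objective: alternative
-- what changed: Replaces A's per-keyword substring loop (13 independent 'kw in s' scans over each field) by a single left-to-right scan of each lowered field that, at every position, tries only the keywords starting with that character via a first-character index dict.
import Mathlib
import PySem

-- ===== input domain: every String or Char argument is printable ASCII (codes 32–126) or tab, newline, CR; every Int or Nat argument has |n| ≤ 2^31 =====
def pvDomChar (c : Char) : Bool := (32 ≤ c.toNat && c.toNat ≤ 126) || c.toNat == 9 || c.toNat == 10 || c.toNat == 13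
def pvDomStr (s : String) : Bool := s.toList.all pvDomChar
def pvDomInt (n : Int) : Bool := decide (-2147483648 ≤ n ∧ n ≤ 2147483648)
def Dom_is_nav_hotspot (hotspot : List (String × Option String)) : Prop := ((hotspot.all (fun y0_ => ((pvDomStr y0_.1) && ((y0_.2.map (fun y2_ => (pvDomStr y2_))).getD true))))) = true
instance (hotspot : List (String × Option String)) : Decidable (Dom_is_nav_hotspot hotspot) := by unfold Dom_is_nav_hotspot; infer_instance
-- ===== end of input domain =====

-- ===== PORT A =====
-- B replaces the per-keyword substring loop by a single left-to-right scan that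
-- dispatches on the first character (alternative decomposition; same cost class).

-- shared extraction: `hotspot.get(k) or ''` — exact: Python's `v or ''` returns v
-- itself when v is a non-empty string and '' when v is None/'' (same value).
def navGetOrEmpty (d : PySem.Dict String (Option String)) (k : String) : String :=
  match d.get? k with
  | some (some s) => s
  | _ => ""

def navKeywords : List String :=
  ["back", "exit", "leave", "drive", "return", "go_to", "goto",
   "navigate", "door", "path", "road", "arrow", "map"]

-- A's `for kw in nav_keywords: if kw in hid or kw in hname: return True`
def navLoopA (hid hname : String) : List String → Bool
  | [] => false
  | kw :: rest =>
    if PySem.Str.isIn kw hid || PySem.Str.isIn kw hname then true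
    else navLoopA hid hname rest

def is_nav_hotspot (hotspot : List (String × Option String)) : Bool :=
  let d := PySem.Dict.ofList hotspot
  let hid := PySem.Str.lower (navGetOrEmpty d "id")
  let hname := PySem.Str.lower (navGetOrEmpty d "name")
  navLoopA hid hname navKeywords

-- ===== PORT B =====
def navByFirst : PySem.Dict Char (List String) :=
  PySem.Dict.ofList
    [('b', ["back"]), ('e', ["exit"]), ('l', ["leave"]), ('d', ["drive", "door"]),
     ('r', ["return", "road"]), ('g', ["go_to", "goto"]), ('n', ["navigate"]),
     ('p', ["path"]), ('a', ["arrow"]), ('m', ["map"])]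

-- B's `for i, ch in enumerate(s): for kw in NAV_BY_FIRST.get(ch, []): if s.startswith(kw, i)`
-- (each suffix c :: rest is the scan position i; s.startswith(kw, i) = startswith of the suffix)
def scanNav : List Char → Bool
  | [] => false
  | c :: rest =>
    ((PySem.Dict.getD navByFirst c []).any
        (fun kw => PySem.Chars.startswith (c :: rest) kw.toList))
      || scanNav rest

def hasNav (text : String) : Bool :=
  scanNav (PySem.Str.lower text).toList

def is_nav_hotspot_alt (hotspot : List (String × Option String)) : Bool :=
  let d := PySem.Dict.ofList hotspot
  hasNav (navGetOrEmpty d "id") || hasNav (navGetOrEmpty d "name")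

-- ===== PRECONDITION & SPEC =====
def Spec_is_nav_hotspot (hotspot : List (String × Option String)) (out : Bool) : Prop := out = is_nav_hotspot_alt hotspot
instance (hotspot : List (String × Option String)) (out : Bool) : Decidable (Spec_is_nav_hotspot hotspot out) := by unfold Spec_is_nav_hotspot; infer_instance

-- ===== CLAIM (what is proved, stated in full; the proofs are below) =====
def Claim_equal_is_nav_hotspot : Prop := ∀ (hotspot : List (String × Option String)), Dom_is_nav_hotspot hotspot → Spec_is_nav_hotspot hotspot (is_nav_hotspot hotspot)

-- ===== LEMMAS AND PROOFS =====

-- the keyword list on the char-list side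
def navKL : List (List Char) := navKeywords.map String.toList

lemma navByFirst_mk : navByFirst = PySem.Dict.mk
    [('b', ["back"]), ('e', ["exit"]), ('l', ["leave"]), ('d', ["drive", "door"]),
     ('r', ["return", "road"]), ('g', ["go_to", "goto"]), ('n', ["navigate"]),
     ('p', ["path"]), ('a', ["arrow"]), ('m', ["map"])] := by decide

lemma navKL_eq : navKL =
    [['b', 'a', 'c', 'k'],
     ['e', 'x', 'i', 't'],
     ['l', 'e', 'a', 'v', 'e'],
     ['d', 'r', 'i', 'v', 'e'],
     ['r', 'e', 't', 'u', 'r', 'n'],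
     ['g', 'o', '_', 't', 'o'],
     ['g', 'o', 't', 'o'],
     ['n', 'a', 'v', 'i', 'g', 'a', 't', 'e'],
     ['d', 'o', 'o', 'r'],
     ['p', 'a', 't', 'h'],
     ['r', 'o', 'a', 'd'],
     ['a', 'r', 'r', 'o', 'w'],
     ['m', 'a', 'p']] := by decide

-- every keyword the first-character index yields is one of A's keywords
lemma navByFirst_subset (c : Char) (kw : String)
    (h : kw ∈ PySem.Dict.getD navByFirst c []) : kw ∈ navKeywords := by
  rw [navByFirst_mk] at h
  simp only [PySem.Dict.getD, PySem.Dict.get?_mk_cons] at h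
  repeat' split at h
  all_goals simp_all [navKeywords]
  all_goals tauto

-- every keyword beginning with c is listed under c in the index
lemma navByFirst_complete (c : Char) (t : List Char)
    (h : (c :: t) ∈ navKL) : ∃ kw ∈ PySem.Dict.getD navByFirst c [], kw.toList = c :: t := by
  rw [navKL_eq] at h
  simp only [List.mem_cons, List.not_mem_nil, or_false, List.cons_eq_cons] at h
  rcases h with ⟨rfl, rfl⟩|⟨rfl, rfl⟩|⟨rfl, rfl⟩|⟨rfl, rfl⟩|⟨rfl, rfl⟩|⟨rfl, rfl⟩|⟨rfl, rfl⟩|⟨rfl, rfl⟩|⟨rfl, rfl⟩|⟨rfl, rfl⟩|⟨rfl, rfl⟩|⟨rfl, rfl⟩|⟨rfl, rfl⟩ <;> decide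

-- B's scan finds exactly the strings containing some keyword as an infix
lemma scanNav_iff (s : List Char) : scanNav s = true ↔ ∃ kw ∈ navKL, kw <:+: s := by
  induction s with
  | nil => rw [navKL_eq]; decide
  | cons c rest ih =>
    simp only [scanNav, Bool.or_eq_true, List.any_eq_true, ih]
    constructor
    · rintro (⟨kw, hk, hsw⟩ | ⟨kw, hk, hinf⟩)
      · exact ⟨kw.toList, List.mem_map_of_mem (navByFirst_subset c kw hk),
          ((PySem.Chars.startswith_iff _ _).mp hsw).isInfix⟩
      · exact ⟨kw, hk, List.infix_cons_iff.mpr (Or.inr hinf)⟩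
    · rintro ⟨kw, hkmem, hinf⟩
      rcases List.infix_cons_iff.mp hinf with hpre | hinf
      · cases kw with
        | nil =>
          exfalso; rw [navKL_eq] at hkmem; simp at hkmem
        | cons k t =>
          obtain ⟨hkc, htl⟩ := List.cons_prefix_cons.mp hpre
          rw [hkc] at hkmem
          obtain ⟨kw', hk', hkl⟩ := navByFirst_complete c t hkmem
          exact Or.inl ⟨kw', hk',
            (PySem.Chars.startswith_iff _ _).mpr
              (by rw [hkl]; exact List.cons_prefix_cons.mpr ⟨rfl, htl⟩)⟩
      · exact Or.inr ⟨kw, hkmem, hinf⟩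

-- A's early-return loop finds exactly the same condition
lemma navLoopA_iff (hid hname : String) (kws : List String) :
    navLoopA hid hname kws = true ↔
      ∃ kw ∈ kws, kw.toList <:+: hid.toList ∨ kw.toList <:+: hname.toList := by
  induction kws with
  | nil => simp [navLoopA]
  | cons kw rest ih =>
    by_cases hb : (PySem.Str.isIn kw hid || PySem.Str.isIn kw hname) = true
    · simp only [navLoopA, hb, if_true]
      simp only [Bool.or_eq_true, PySem.Str.isIn_iff_infix] at hb
      simp only [true_iff]
      exact ⟨kw, List.mem_cons_self, hb⟩
    · have hb' : (PySem.Str.isIn kw hid || PySem.Str.isIn kw hname) = false :=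
        Bool.eq_false_iff.mpr hb
      rw [show navLoopA hid hname (kw :: rest) = navLoopA hid hname rest from by
        simp only [navLoopA, hb', Bool.false_eq_true, if_false], ih]
      simp only [Bool.or_eq_true, PySem.Str.isIn_iff_infix] at hb
      push Not at hb
      constructor
      · rintro ⟨k, hk, hor⟩; exact ⟨k, List.mem_cons_of_mem kw hk, hor⟩
      · rintro ⟨k, hk, hor⟩
        rcases List.mem_cons.mp hk with rfl | hk
        · rcases hor with h | h
          · exact absurd h hb.1
          · exact absurd h hb.2
        · exact ⟨k, hk, hor⟩

-- ===== VERDICT (by name: the statement is the Claim_ definition above) =====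
theorem is_nav_hotspot_spec : Claim_equal_is_nav_hotspot := by
  unfold Claim_equal_is_nav_hotspot
  intro hotspot _
  unfold Spec_is_nav_hotspot is_nav_hotspot is_nav_hotspot_alt hasNav
  rw [Bool.eq_iff_iff]
  simp only [Bool.or_eq_true, scanNav_iff, navLoopA_iff, navKL, List.mem_map]
  constructor
  · rintro ⟨kw, hk, h | h⟩
    · exact Or.inl ⟨kw.toList, ⟨kw, hk, rfl⟩, h⟩
    · exact Or.inr ⟨kw.toList, ⟨kw, hk, rfl⟩, h⟩
  · rintro (⟨l, ⟨kw, hk, rfl⟩, h⟩ | ⟨l, ⟨kw, hk, rfl⟩, h⟩)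
    · exact ⟨kw, hk, Or.inl h⟩
    · exact ⟨kw, hk, Or.inr h⟩
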